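-- pv_equiv track=rewrite | github.com/David-osb/betyard.net | ml-backend/app.py | _get_team_division
-- ===== SOURCE A (Python) =====
-- def _get_team_division(team_code: str) -> str:
--     """Get team's division"""
--     divisions = {
--         'AFC East': ['BUF', 'MIA', 'NE', 'NYJ'],
--         'AFC North': ['BAL', 'CIN', 'CLE', 'PIT'],
--         'AFC South': ['HOU', 'IND', 'JAX', 'TEN'],
--         'AFC West': ['DEN', 'KC', 'LV', 'LAC'],
--         'NFC East': ['DAL', 'NYG', 'PHI', 'WAS'],
--         'NFC North': ['CHI', 'DET', 'GB', 'MIN'],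
--         'NFC South': ['ATL', 'CAR', 'NO', 'TB'],
--         'NFC West': ['ARI', 'LAR', 'SF', 'SEA']
--     }
--
--     for division, teams in divisions.items():
--         if team_code.upper() in teams:
--             return division
--     return 'Unknown'
-- ===== SOURCE B (Python) =====
-- # B: one flat ordered tuple of all 32 teams grouped in blocks of 4; the division is
-- # recovered by positional arithmetic (_DIVS[_TEAMS.index(u) // 4]) instead of any
-- # keyed lookup or scan over per-division lists.
-- _TEAMS = ('BUF', 'MIA', 'NE', 'NYJ',
--           'BAL', 'CIN', 'CLE', 'PIT',
--           'HOU', 'IND', 'JAX', 'TEN',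
--           'DEN', 'KC', 'LV', 'LAC',
--           'DAL', 'NYG', 'PHI', 'WAS',
--           'CHI', 'DET', 'GB', 'MIN',
--           'ATL', 'CAR', 'NO', 'TB',
--           'ARI', 'LAR', 'SF', 'SEA')
-- _DIVS = ('AFC East', 'AFC North', 'AFC South', 'AFC West',
--          'NFC East', 'NFC North', 'NFC South', 'NFC West')
--
-- def _get_team_division(team_code: str) -> str:
--     """Get team's division"""
--     try:
--         return _DIVS[_TEAMS.index(team_code.upper()) // 4]
--     except ValueError:
--         return 'Unknown'
-- ===== Notes on version B (the rewrite author's own statement) =====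
-- stated objective: alternative
-- what changed: Replaces the division->teams dict and its scan-with-inner-membership-test by one flat ordered 32-team tuple and positional arithmetic: the division is _DIVS[_TEAMS.index(code) // 4], with ValueError mapped to 'Unknown'.
import Mathlib
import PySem

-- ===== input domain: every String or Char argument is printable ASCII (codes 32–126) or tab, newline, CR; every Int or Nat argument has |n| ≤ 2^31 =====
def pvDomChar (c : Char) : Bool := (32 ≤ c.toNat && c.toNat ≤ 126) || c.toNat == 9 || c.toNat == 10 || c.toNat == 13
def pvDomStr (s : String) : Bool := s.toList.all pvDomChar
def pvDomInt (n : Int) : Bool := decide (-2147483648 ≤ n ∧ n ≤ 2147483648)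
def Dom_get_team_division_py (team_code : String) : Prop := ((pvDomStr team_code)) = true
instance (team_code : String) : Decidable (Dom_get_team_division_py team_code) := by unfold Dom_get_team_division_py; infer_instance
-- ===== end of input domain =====

-- B replaces A's scan over a division->teams dict (with an inner membership test) by one flat
-- ordered 32-team list and positional arithmetic (division = DIVS[index // 4]); same behaviour.

-- ===== PORT A =====
-- A's 'divisions' dict literal as an association list (division name, team list), insertion order
def pvDivisions : List (String × List String) :=
  [("AFC East", ["BUF","MIA","NE","NYJ"]),
   ("AFC North", ["BAL","CIN","CLE","PIT"]),
   ("AFC South", ["HOU","IND","JAX","TEN"]),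
   ("AFC West", ["DEN","KC","LV","LAC"]),
   ("NFC East", ["DAL","NYG","PHI","WAS"]),
   ("NFC North", ["CHI","DET","GB","MIN"]),
   ("NFC South", ["ATL","CAR","NO","TB"]),
   ("NFC West", ["ARI","LAR","SF","SEA"])]

-- A's 'for division, teams in divisions.items(): if team_code.upper() in teams: return division'
def pvScan (u : String) : List (String × List String) → String
  | [] => "Unknown"
  | (d, teams) :: rest => if u ∈ teams then d else pvScan u rest

def get_team_division_py (team_code : String) : String :=
  pvScan (PySem.Str.upper team_code) pvDivisions

-- ===== PORT B =====
-- B's flat ordered tuple _TEAMS (blocks of 4 per division) and _DIVS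
def pvTeams : List String :=
  ["BUF","MIA","NE","NYJ",
   "BAL","CIN","CLE","PIT",
   "HOU","IND","JAX","TEN",
   "DEN","KC","LV","LAC",
   "DAL","NYG","PHI","WAS",
   "CHI","DET","GB","MIN",
   "ATL","CAR","NO","TB",
   "ARI","LAR","SF","SEA"]

def pvDivs : List String :=
  ["AFC East","AFC North","AFC South","AFC West",
   "NFC East","NFC North","NFC South","NFC West"]

-- '_DIVS[_TEAMS.index(u) // 4]' with 'except ValueError: return "Unknown"'.
-- index? = some i implies i < 32, so i // 4 < 8 and the pyGet? is always some;
-- the getD default is unreachable (exact: Python's [] never raises here).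
def pvByIndex (u : String) : String :=
  match PySem.List.index? pvTeams u with
  | some i => (PySem.List.pyGet? pvDivs (PySem.Int.floordiv (Int.ofNat i) 4)).getD "Unknown"
  | none => "Unknown"

def get_team_division_py_alt (team_code : String) : String :=
  pvByIndex (PySem.Str.upper team_code)

-- ===== PRECONDITION & SPEC =====
def Spec_get_team_division_py (team_code : String) (out : String) : Prop := out = get_team_division_py_alt team_code
instance (team_code : String) (out : String) : Decidable (Spec_get_team_division_py team_code out) := by unfold Spec_get_team_division_py; infer_instance

-- ===== CLAIM =====
def Claim_equal_get_team_division_py : Prop := ∀ (team_code : String), Dom_get_team_division_py team_code → Spec_get_team_division_py team_code (get_team_division_py team_code)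

-- ===== LEMMAS AND PROOFS =====
-- For EVERY string u, A's scan over the 8 divisions returns the same name as B's
-- positional lookup: 32 literal cases plus the catch-all where both return "Unknown".
set_option maxHeartbeats 2000000 in
lemma pvScan_eq_byIndex (u : String) : pvScan u pvDivisions = pvByIndex u := by
  by_cases h0 : u = "BUF"
  · subst h0; decide
  by_cases h1 : u = "MIA"
  · subst h1; decide
  by_cases h2 : u = "NE"
  · subst h2; decide
  by_cases h3 : u = "NYJ"
  · subst h3; decide
  by_cases h4 : u = "BAL"
  · subst h4; decide
  by_cases h5 : u = "CIN"
  · subst h5; decide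
  by_cases h6 : u = "CLE"
  · subst h6; decide
  by_cases h7 : u = "PIT"
  · subst h7; decide
  by_cases h8 : u = "HOU"
  · subst h8; decide
  by_cases h9 : u = "IND"
  · subst h9; decide
  by_cases h10 : u = "JAX"
  · subst h10; decide
  by_cases h11 : u = "TEN"
  · subst h11; decide
  by_cases h12 : u = "DEN"
  · subst h12; decide
  by_cases h13 : u = "KC"
  · subst h13; decide
  by_cases h14 : u = "LV"
  · subst h14; decide
  by_cases h15 : u = "LAC"
  · subst h15; decide
  by_cases h16 : u = "DAL"
  · subst h16; decide
  by_cases h17 : u = "NYG"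
  · subst h17; decide
  by_cases h18 : u = "PHI"
  · subst h18; decide
  by_cases h19 : u = "WAS"
  · subst h19; decide
  by_cases h20 : u = "CHI"
  · subst h20; decide
  by_cases h21 : u = "DET"
  · subst h21; decide
  by_cases h22 : u = "GB"
  · subst h22; decide
  by_cases h23 : u = "MIN"
  · subst h23; decide
  by_cases h24 : u = "ATL"
  · subst h24; decide
  by_cases h25 : u = "CAR"
  · subst h25; decide
  by_cases h26 : u = "NO"
  · subst h26; decide
  by_cases h27 : u = "TB"
  · subst h27; decide
  by_cases h28 : u = "ARI"
  · subst h28; decide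
  by_cases h29 : u = "LAR"
  · subst h29; decide
  by_cases h30 : u = "SF"
  · subst h30; decide
  by_cases h31 : u = "SEA"
  · subst h31; decide
  -- catch-all: u is none of the 32 team codes, so both sides return "Unknown"
  have hnot : u ∉ pvTeams := by
    simp [pvTeams, h0, h1, h2, h3, h4, h5, h6, h7, h8, h9, h10, h11, h12, h13, h14, h15,
      h16, h17, h18, h19, h20, h21, h22, h23, h24, h25, h26, h27, h28, h29, h30, h31]
  have hB : pvByIndex u = "Unknown" := by
    unfold pvByIndex
    rw [(PySem.List.index?_eq_none_iff _ _).mpr hnot]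
  rw [hB]
  simp [pvDivisions, pvScan, h0, h1, h2, h3, h4, h5, h6, h7, h8, h9, h10, h11, h12, h13,
    h14, h15, h16, h17, h18, h19, h20, h21, h22, h23, h24, h25, h26, h27, h28, h29, h30, h31]

-- ===== VERDICT =====
theorem get_team_division_py_spec : Claim_equal_get_team_division_py := by
  intro team_code _
  unfold Spec_get_team_division_py get_team_division_py get_team_division_py_alt
  exact pvScan_eq_byIndex (PySem.Str.upper team_code)
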